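-- pv_equiv track=rewrite | github.com/LuisAngelHM/python | DesignerDoorMat.py | designerDoorMat
-- ===== SOURCE A (Python) =====
-- def print_dash(n):
--     return int(n)*'-'
--
-- def print_decorators(n):
--     return int(n)*".|."
--
-- def designerDoorMat(n,m):
--     cadena = ''
--     for i in range(1,(n//2)+1):
--         number_decorations = (2*(i-1))+1
--         dashs = print_dash((m-(3*number_decorations))/2)
--         center = print_decorators(number_decorations)
--         cadena = cadena +dashs+center+dashs + '\n'
--     dashs = print_dash((m-(7))/2)
--     center = 'WELCOME'
--     cadena = cadena +dashs+center+dashs+ '\n'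
--     for i in range((n//2),0,-1):
--         number_decorations = (2*(i-1))+1
--         dashs = print_dash((m-(3*number_decorations))/2)
--         center = print_decorators(number_decorations)
--         cadena = cadena +dashs+center+dashs+ '\n'
--     return cadena
-- ===== SOURCE B (Python) =====
-- def designerDoorMat(n, m):
--     # one unified pass over all row indices r with mirrored-index formula
--     # min(r, 2h-r); each pattern row is synthesized character-by-character
--     # from its column coordinate, with no string repetition and no second loop.
--     h = max(n // 2, 0)
--     lines = []
--     for r in range(2*h + 1):
--         if r == h:
--             d = max(int((m - 7) / 2), 0)
--             lines.append('-' * d + 'WELCOME' + '-' * d)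
--         else:
--             nd = 2 * min(r, 2*h - r) + 1
--             d = max(int((m - 3*nd) / 2), 0)
--             dd = d + 3 * nd
--             lines.append(''.join(
--                 '-' if j < d or j >= dd else ('|' if (j - d) % 3 == 1 else '.')
--                 for j in range(dd + d)))
--     return ''.join(line + '\n' for line in lines)
-- ===== Notes on version B (the rewrite author's own statement) =====
-- stated objective: alternative
-- what changed: B replaces A's two symmetric loops of string-repetition rows and quadratic accumulator concatenation by a single pass over all row indices that derives each row from the mirrored index min(r, 2h-r) and synthesizes every pattern row character-by-character from its column coordinate, joining once at the end; it trades string repetition for per-character arithmetic.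
import Mathlib
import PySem

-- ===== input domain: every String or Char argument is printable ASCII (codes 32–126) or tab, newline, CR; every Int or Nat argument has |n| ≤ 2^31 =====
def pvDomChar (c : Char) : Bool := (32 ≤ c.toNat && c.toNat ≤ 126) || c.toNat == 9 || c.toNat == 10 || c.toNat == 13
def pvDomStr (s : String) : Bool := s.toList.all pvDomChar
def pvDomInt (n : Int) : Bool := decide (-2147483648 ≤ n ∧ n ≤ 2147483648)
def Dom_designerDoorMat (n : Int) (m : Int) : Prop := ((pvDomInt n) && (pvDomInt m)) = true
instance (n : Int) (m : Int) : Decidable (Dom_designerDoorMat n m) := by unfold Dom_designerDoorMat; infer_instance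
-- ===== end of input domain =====

-- B makes ONE pass over all row indices, deriving each row from the mirrored index
-- min(r, 2h-r) and synthesizing each pattern row character-by-character from its column
-- coordinate (no string repetition, no second loop, single final join).
-- ===== PORT A =====
-- helpers print_dash / print_decorators: int(k)*'-' and int(k)*".|." (Python string repetition; empty for k <= 0)
def pvDash (k : Int) : List Char := PySem.List.pyRepeat ['-'] k
def pvDeco (k : Int) : List Char := PySem.List.pyRepeat ['.', '|', '.'] k

-- int((m-3*nd)/2): float true division then int() truncates toward zero; exact as truncdiv on the |.|<2^53 domain
def designerDoorMat (n : Int) (m : Int) : String :=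
  let cadena : List Char := []
  let cadena := (PySem.List.pyRange 1 (PySem.Int.floordiv n 2 + 1) 1).foldl
    (fun cad i =>
      let nd := 2*(i-1)+1
      let dashs := pvDash (PySem.Int.truncdiv (m - 3*nd) 2)
      let center := pvDeco nd
      cad ++ dashs ++ center ++ dashs ++ ['\n']) cadena
  let dashs := pvDash (PySem.Int.truncdiv (m - 7) 2)
  let cadena := cadena ++ dashs ++ "WELCOME".toList ++ dashs ++ ['\n']
  let cadena := (PySem.List.pyRange (PySem.Int.floordiv n 2) 0 (-1)).foldl
    (fun cad i =>
      let nd := 2*(i-1)+1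
      let dashs := pvDash (PySem.Int.truncdiv (m - 3*nd) 2)
      let center := pvDeco nd
      cad ++ dashs ++ center ++ dashs ++ ['\n']) cadena
  String.ofList cadena

-- ===== PORT B =====
-- '-' * d with d = max(...,0): List.replicate; ''.join(gen) over range = flatten of the mapped list (exact)
def designerDoorMat_alt (n : Int) (m : Int) : String :=
  let h := max (PySem.Int.floordiv n 2) 0
  let lines := (PySem.List.pyRange 0 (2*h + 1) 1).map (fun r =>
    if r = h then
      let d := max (PySem.Int.truncdiv (m - 7) 2) 0
      List.replicate d.toNat '-' ++ "WELCOME".toList ++ List.replicate d.toNat '-'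
    else
      let nd := 2 * min r (2*h - r) + 1
      let d := max (PySem.Int.truncdiv (m - 3*nd) 2) 0
      let dd := d + 3*nd
      (PySem.List.pyRange 0 (dd + d) 1).map (fun j =>
        if j < d ∨ dd ≤ j then '-'
        else if PySem.Int.mod (j - d) 3 = 1 then '|' else '.'))
  String.ofList ((lines.map (fun l => l ++ ['\n'])).flatten)

-- ===== PRECONDITION & SPEC =====
def Spec_designerDoorMat (n : Int) (m : Int) (out : String) : Prop := out = designerDoorMat_alt n m
instance (n : Int) (m : Int) (out : String) : Decidable (Spec_designerDoorMat n m out) := by unfold Spec_designerDoorMat; infer_instance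

-- ===== CLAIM =====
def Claim_equal_designerDoorMat : Prop := ∀ (n : Int) (m : Int), Dom_designerDoorMat n m → Spec_designerDoorMat n m (designerDoorMat n m)

-- ===== LEMMAS AND PROOFS =====

theorem pv_toNat_max (t : Int) : (max t 0).toNat = t.toNat := by
  rcases le_total t 0 with h | h
  · simp [max_eq_right h, Int.toNat_of_nonpos h]
  · simp [max_eq_left h]

theorem pv_cycle (c : Nat) :
    (List.range (3*c)).map (fun k => if k % 3 = 1 then '|' else '.')
      = PySem.List.pyRepeat ['.', '|', '.'] (c : Int) := by
  induction c with
  | zero => simp [PySem.List.pyRepeat]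
  | succ c ih =>
    rw [show 3*(c+1) = (3*c)+1+1+1 by ring]
    rw [List.range_succ, List.range_succ, List.range_succ]
    simp only [List.map_append, List.map_cons, List.map_nil, ih]
    simp [PySem.List.pyRepeat, List.replicate_succ']

theorem pv_row (d nd : Int) (hd : 0 ≤ d) (hnd : 0 ≤ nd) :
    (PySem.List.pyRange 0 (d + 3*nd + d) 1).map (fun j =>
        if j < d ∨ d + 3*nd ≤ j then '-'
        else if PySem.Int.mod (j - d) 3 = 1 then '|' else '.')
      = List.replicate d.toNat '-' ++ PySem.List.pyRepeat ['.', '|', '.'] nd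
          ++ List.replicate d.toNat '-' := by
  rw [PySem.List.pyRange_one_append 0 d (d + 3*nd + d) (by omega) (by omega),
      PySem.List.pyRange_one_append d (d + 3*nd) (d + 3*nd + d) (by omega) (by omega)]
  simp only [List.map_append, List.append_assoc]
  congr 1
  · rw [List.map_congr_left (g := fun _ => '-')
        (fun j hj => by
          rw [PySem.List.mem_pyRange_one] at hj
          simp [if_pos (Or.inl hj.2)])]
    simp [List.map_const', PySem.List.length_pyRange_one]
  congr 1
  · rw [PySem.List.pyRange_one]
    rw [show (d + 3*nd - d) = 3*nd by ring]
    rw [show (3*nd).toNat = 3 * nd.toNat by omega]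
    rw [List.map_map]
    rw [show nd = ((nd.toNat : Nat) : Int) by omega]
    rw [← pv_cycle nd.toNat]
    apply List.map_congr_left
    intro k hk
    simp only [List.mem_range] at hk
    simp only [Function.comp]
    rw [if_neg (by omega)]
    rw [show d + (k:Int) - d = (k:Int) by ring]
    rw [show (3:Int) = ((3:Nat):Int) from rfl, PySem.Int.mod_natCast]
    by_cases h : k % 3 = 1
    · rw [if_pos (by exact_mod_cast h), if_pos h]
    · rw [if_neg (fun hh => h (by exact_mod_cast hh)), if_neg h]
  · rw [List.map_congr_left (g := fun _ => '-')
        (fun j hj => by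
          rw [PySem.List.mem_pyRange_one] at hj
          simp [if_pos (Or.inr hj.1)])]
    simp [List.map_const', PySem.List.length_pyRange_one]

theorem pv_main (n m : Int) : designerDoorMat n m = designerDoorMat_alt n m := by
  unfold designerDoorMat designerDoorMat_alt
  simp only [List.append_assoc, PySem.List.foldl_append_eq_flatMap, List.nil_append]
  set t := PySem.Int.floordiv n 2 with ht
  rcases le_or_gt t 0 with hle | hpos
  · rw [max_eq_right hle]
    rw [PySem.List.pyRange_one_eq_nil (by omega : t + 1 ≤ 1)]
    rw [PySem.List.pyRange_neg_one, show (t - 0).toNat = 0 by omega]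
    rw [show (2*(0:Int)+1) = 0+1 by norm_num, PySem.List.pyRange_one_singleton]
    simp [pvDash, PySem.List.pyRepeat_singleton, pv_toNat_max, List.append_assoc]
  · rw [max_eq_left (by omega)]
    rw [PySem.List.pyRange_one_append 0 t (2*t+1) (by omega) (by omega),
        PySem.List.pyRange_one_append t (t+1) (2*t+1) (by omega) (by omega),
        PySem.List.pyRange_one_singleton]
    rw [PySem.List.pyRange_neg_one]
    rw [PySem.List.pyRange_one 1 (t+1), PySem.List.pyRange_one 0 t,
        PySem.List.pyRange_one (t+1) (2*t+1)]
    rw [show (t + 1 - 1) = t by ring, show (t - 0) = t by ring,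
        show (2*t + 1 - (t+1)) = t by ring]
    simp only [List.map_append, List.map_map, List.map_cons, List.map_nil,
      List.flatten_append, List.flatten_cons, List.append_assoc, List.flatMap_map]
    simp only [Function.comp_def, if_true, List.flatten_nil,
      List.nil_append, List.flatMap_def, List.append_assoc]
    congr 1
    congr 1
    · -- upper rows
      congr 1
      apply List.map_congr_left
      intro a ha
      simp only [List.mem_range] at ha
      rw [if_neg (by omega : ¬ ((0:Int) + ↑a = t)),
          min_eq_left (by omega : (0:Int) + ↑a ≤ 2*t - (0 + ↑a))]
      rw [pv_row _ _ (le_max_right _ _) (by omega)]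
      rw [show (2*((1:Int)+↑a-1)+1) = 2*(0+↑a)+1 by ring]
      simp [pvDash, pvDeco, PySem.List.pyRepeat_singleton, pv_toNat_max, List.append_assoc]
    · -- welcome line and lower rows
      simp only [pvDash, PySem.List.pyRepeat_singleton, pv_toNat_max]
      congr 4
      congr 1
      apply List.map_congr_left
      intro a ha
      simp only [List.mem_range] at ha
      rw [if_neg (by omega : ¬ (t + 1 + ↑a = t)),
          min_eq_right (by omega : 2*t - (t + 1 + ↑a) ≤ t + 1 + ↑a)]
      rw [pv_row _ _ (le_max_right _ _) (by omega)]
      rw [show (2*(t-↑a-1)+1) = 2*(2*t-(t+1+↑a))+1 by ring]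
      simp [pvDeco, pv_toNat_max, List.append_assoc]

-- ===== VERDICT =====
theorem designerDoorMat_spec : Claim_equal_designerDoorMat := by
  intro n m _hd
  exact pv_main n m
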